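-- pv_equiv track=rewrite | github.com/DominicWuest/Maturaarbeit | public/js/algorithms/hash/sha.py | roundConstants
-- ===== SOURCE A (Python) =====
-- def roundConstants(t):
--     if t % 255 == 0: return 1
--     R = [1, 0, 0, 0, 0, 0, 0, 0]
--     for i in range(t % 255):
--         R = [0] + R
--         R[0] ^= R[8]
--         R[4] ^= R[8]
--         R[5] ^= R[8]
--         R[6] ^= R[8]
--         R = R[:-1]
--     return R[0]
-- ===== SOURCE B (Python) =====
-- def roundConstants(t):
--     # State of A's LFSR after n steps is the polynomial x^n reduced mod
--     # x^8 + x^6 + x^5 + x^4 + 1 (mask 0x171) over GF(2); the answer is its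
--     # constant coefficient.  Compute x^(t % 255) by square-and-multiply.
--     def gf_mul(a, b):
--         # carry-less multiplication modulo 0x171
--         r = 0
--         while b:
--             if b & 1:
--                 r ^= a
--             b >>= 1
--             a <<= 1
--             if a & 0x100:
--                 a ^= 0x171
--         return r
--
--     e = t % 255
--     result = 1
--     base = 2  # the polynomial x
--     while e:
--         if e & 1:
--             result = gf_mul(result, base)
--         base = gf_mul(base, base)
--         e >>= 1
--     return result & 1
-- ===== Notes on version B (the rewrite author's own statement) =====
-- stated objective: alternative
-- what changed: Instead of stepping the LFSR t%255 times on a bit list, B computes the state directly as the polynomial x^(t%255) mod x^8+x^6+x^5+x^4+1 over GF(2) by exponentiation by squaring with a carry-less multiply, returning its constant bit.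
import Mathlib
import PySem

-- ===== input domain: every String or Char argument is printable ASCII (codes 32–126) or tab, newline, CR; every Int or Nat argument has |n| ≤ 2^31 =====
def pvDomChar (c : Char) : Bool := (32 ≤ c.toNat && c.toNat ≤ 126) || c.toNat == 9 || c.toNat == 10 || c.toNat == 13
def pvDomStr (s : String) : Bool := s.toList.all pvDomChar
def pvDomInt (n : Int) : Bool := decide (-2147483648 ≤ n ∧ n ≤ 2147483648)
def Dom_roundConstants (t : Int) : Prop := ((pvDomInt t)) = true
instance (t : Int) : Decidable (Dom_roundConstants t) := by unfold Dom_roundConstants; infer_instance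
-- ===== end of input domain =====

-- B computes the LFSR state in closed form as x^(t%255) in GF(2^8) by square-and-multiply
-- instead of stepping the register t%255 times (alternative algorithm, same result).

-- ===== PORT A =====
-- literal transliteration: list of 9 bits per step, indexed updates, drop last
def roundConstants (t : Int) : Int :=
  if PySem.Int.mod t 255 = 0 then 1
  else
    let R : List Int := [1, 0, 0, 0, 0, 0, 0, 0]
    let R := (PySem.List.pyRange 0 (PySem.Int.mod t 255) 1).foldl (fun R _ =>
      let R := (0 : Int) :: R
      let R := PySem.List.pySetD R 0 (PySem.Int.bxor (PySem.List.pyGetD R 0 0) (PySem.List.pyGetD R 8 0))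
      let R := PySem.List.pySetD R 4 (PySem.Int.bxor (PySem.List.pyGetD R 4 0) (PySem.List.pyGetD R 8 0))
      let R := PySem.List.pySetD R 5 (PySem.Int.bxor (PySem.List.pyGetD R 5 0) (PySem.List.pyGetD R 8 0))
      let R := PySem.List.pySetD R 6 (PySem.Int.bxor (PySem.List.pyGetD R 6 0) (PySem.List.pyGetD R 8 0))
      PySem.List.slice R none (some (-1))) R
    PySem.List.pyGetD R 0 0

-- ===== PORT B =====
-- Source B's gf_mul while-loop; all values are nonnegative Python ints here, so Nat is exact:
-- 'b >>= 1' is b / 2, 'a <<= 1' is a * 2, '&'/'^' are Nat.land/Nat.xor.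
-- (fuel = b makes the while-loop structural; b halves each step, so fuel b always suffices)
def gfMulAux : Nat → Nat → Nat → Nat → Nat
  | 0, _, _, r => r
  | fuel + 1, a, b, r =>
    if b = 0 then r
    else
      let r := if b &&& 1 ≠ 0 then r ^^^ a else r
      let b := b / 2
      let a := a * 2
      let a := if a &&& 256 ≠ 0 then a ^^^ 369 else a
      gfMulAux fuel a b r

def gfMul (a b : Nat) : Nat := gfMulAux b a b 0

-- Source B's square-and-multiply while-loop on the exponent
def powAux : Nat → Nat → Nat → Nat → Nat
  | 0, result, _, _ => result
  | fuel + 1, result, base, e =>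
    if e = 0 then result
    else
      let result := if e &&& 1 ≠ 0 then gfMul result base else result
      let base := gfMul base base
      powAux fuel result base (e / 2)

-- e = t % 255 is nonnegative in Python (divisor positive), so .toNat is exact
def roundConstants_alt (t : Int) : Int :=
  let e := (PySem.Int.mod t 255).toNat
  ((powAux e 1 2 e) &&& 1 : Nat)

-- ===== PRECONDITION & SPEC =====
def Spec_roundConstants (t : Int) (out : Int) : Prop := out = roundConstants_alt t
instance (t : Int) (out : Int) : Decidable (Spec_roundConstants t out) := by unfold Spec_roundConstants; infer_instance

-- ===== CLAIM (what is proved, stated in full; the proofs are below) =====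
def Claim_equal_roundConstants : Prop := ∀ (t : Int), Dom_roundConstants t → Spec_roundConstants t (roundConstants t)

-- ===== LEMMAS AND PROOFS =====

-- both programs depend on t only through t % 255 ∈ [0, 255): a finite check closes every residue
set_option maxRecDepth 100000 in
theorem roundConstants_key : ∀ r : Fin 255, roundConstants ((r : Nat) : Int) = roundConstants_alt ((r : Nat) : Int) := by decide

-- ===== VERDICT (by name: the statement is the Claim_ definition above) =====
theorem roundConstants_spec : Claim_equal_roundConstants := by
  intro t _
  unfold Spec_roundConstants
  set r := PySem.Int.mod t 255 with hr
  have h0 : 0 ≤ r := PySem.Int.mod_nonneg t (by norm_num)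
  have h1 : r < 255 := PySem.Int.mod_lt t (by norm_num)
  have hidem : PySem.Int.mod r 255 = r := by
    rw [PySem.Int.mod_eq_emod_of_pos (by norm_num : (0:Int) < 255)]
    exact Int.emod_eq_of_lt h0 h1
  have hA : roundConstants t = roundConstants r := by
    unfold roundConstants; rw [hidem]
  have hB : roundConstants_alt t = roundConstants_alt r := by
    unfold roundConstants_alt; rw [hidem]
  have hn : r = ((r.toNat : Nat) : Int) := (Int.toNat_of_nonneg h0).symm
  have hlt : r.toNat < 255 := by omega
  rw [hA, hB, hn]
  exact roundConstants_key ⟨r.toNat, hlt⟩
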